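-- pv_equiv track=rewrite | github.com/deeppavlov/DeepPavlov | deeppavlov/models/spelling_correction/levenshtein/levenshtein_searcher.py | _minimal_replacement_cost
-- ===== SOURCE A (Python) =====
-- import itertools
--
-- def _minimal_replacement_cost(first, second):
--     first_symbols, second_symbols = set(), set()
--     removal_cost, insertion_cost = 0, 0
--     for a, b in itertools.zip_longest(first, second, fillvalue=None):
--         if a is not None:
--             first_symbols.add(a)
--         if b is not None:
--             second_symbols.add(b)
--         removal_cost = max(removal_cost, len(first_symbols - second_symbols))
--         insertion_cost = max(insertion_cost, len(second_symbols - first_symbols))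
--     return min(removal_cost, insertion_cost)
-- ===== SOURCE B (Python) =====
-- def _minimal_replacement_cost(first, second):
--     seen_first, seen_second = set(), set()
--     only_first = only_second = 0          # |seen_first - seen_second|, |seen_second - seen_first|
--     removal_cost = insertion_cost = 0
--     for i in range(max(len(first), len(second))):
--         if i < len(first):
--             a = first[i]
--             if a not in seen_first:
--                 seen_first.add(a)
--                 if a in seen_second:
--                     only_second -= 1
--                 else:
--                     only_first += 1
--         if i < len(second):
--             b = second[i]
--             if b not in seen_second:
--                 seen_second.add(b)
--                 if b in seen_first:
--                     only_first -= 1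
--                 else:
--                     only_second += 1
--         if only_first > removal_cost:
--             removal_cost = only_first
--         if only_second > insertion_cost:
--             insertion_cost = only_second
--     return min(removal_cost, insertion_cost)
-- ===== Notes on version B (the rewrite author's own statement) =====
-- stated objective: faster
-- what changed: Instead of recomputing both full set differences at every position, B maintains the two difference cardinalities incrementally with O(1) membership updates per character while tracking the running maxima.
import Mathlib
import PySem

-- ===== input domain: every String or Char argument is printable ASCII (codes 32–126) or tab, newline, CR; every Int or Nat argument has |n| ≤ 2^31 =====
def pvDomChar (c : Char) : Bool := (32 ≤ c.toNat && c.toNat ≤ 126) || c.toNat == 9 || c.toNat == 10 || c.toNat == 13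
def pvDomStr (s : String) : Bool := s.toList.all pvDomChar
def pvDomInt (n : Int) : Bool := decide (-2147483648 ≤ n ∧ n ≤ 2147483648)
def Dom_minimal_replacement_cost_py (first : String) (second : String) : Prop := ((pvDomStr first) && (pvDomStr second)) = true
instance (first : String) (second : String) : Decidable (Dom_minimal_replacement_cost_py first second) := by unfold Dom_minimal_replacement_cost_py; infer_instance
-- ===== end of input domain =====

-- B replaces A's per-step recomputation of both set differences (O(n^2)) by O(1)
-- incremental count updates per character; equivalence of the return values is proved below.

-- ===== PORT A =====
-- itertools.zip_longest(first, second, fillvalue=None)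
def zipLongest (xs ys : List Char) : List (Option Char × Option Char) :=
  match xs, ys with
  | [], [] => []
  | a :: xs', [] => (some a, none) :: zipLongest xs' []
  | [], b :: ys' => (none, some b) :: zipLongest [] ys'
  | a :: xs', b :: ys' => (some a, some b) :: zipLongest xs' ys'

-- one loop body of A: add a/b to the sets, then update both running maxima
def aStep (st : PySem.Set Char × PySem.Set Char × Int × Int) (p : Option Char × Option Char) :
    PySem.Set Char × PySem.Set Char × Int × Int :=
  let S1 := match p.1 with | some a => PySem.Set.add st.1 a | none => st.1
  let S2 := match p.2 with | some b => PySem.Set.add st.2.1 b | none => st.2.1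
  (S1, S2,
   max st.2.2.1 (PySem.Set.len (PySem.Set.diff S1 S2)),
   max st.2.2.2 (PySem.Set.len (PySem.Set.diff S2 S1)))

def minimal_replacement_cost_py (first : String) (second : String) : Int :=
  let r := (zipLongest first.toList second.toList).foldl aStep
            (PySem.Set.empty, PySem.Set.empty, 0, 0)
  min r.2.2.1 r.2.2.2

-- ===== PORT B =====
-- B's 'if i < len(first)' branch: incremental update of the two difference counts
def altStepF (a : Char) (S1 S2 : PySem.Set Char) (cf cs : Int) :
    PySem.Set Char × PySem.Set Char × Int × Int :=
  if PySem.Set.contains S1 a then (S1, S2, cf, cs)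
  else if PySem.Set.contains S2 a then (PySem.Set.add S1 a, S2, cf, cs - 1)
  else (PySem.Set.add S1 a, S2, cf + 1, cs)

-- B's 'if i < len(second)' branch
def altStepS (b : Char) (S1 S2 : PySem.Set Char) (cf cs : Int) :
    PySem.Set Char × PySem.Set Char × Int × Int :=
  if PySem.Set.contains S2 b then (S1, S2, cf, cs)
  else if PySem.Set.contains S1 b then (S1, PySem.Set.add S2 b, cf - 1, cs)
  else (S1, PySem.Set.add S2 b, cf, cs + 1)

-- B's main loop: walk both strings once, keeping sets, both counts and both maxima
def altGo (xs ys : List Char) (S1 S2 : PySem.Set Char) (cf cs rem ins : Int) : Int :=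
  match xs, ys with
  | [], [] => min rem ins
  | a :: xs', [] =>
    let t := altStepF a S1 S2 cf cs
    altGo xs' [] t.1 t.2.1 t.2.2.1 t.2.2.2 (max rem t.2.2.1) (max ins t.2.2.2)
  | [], b :: ys' =>
    let t := altStepS b S1 S2 cf cs
    altGo [] ys' t.1 t.2.1 t.2.2.1 t.2.2.2 (max rem t.2.2.1) (max ins t.2.2.2)
  | a :: xs', b :: ys' =>
    let t1 := altStepF a S1 S2 cf cs
    let t := altStepS b t1.1 t1.2.1 t1.2.2.1 t1.2.2.2
    altGo xs' ys' t.1 t.2.1 t.2.2.1 t.2.2.2 (max rem t.2.2.1) (max ins t.2.2.2)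

def minimal_replacement_cost_py_alt (first : String) (second : String) : Int :=
  altGo first.toList second.toList PySem.Set.empty PySem.Set.empty 0 0 0 0

-- ===== PRECONDITION & SPEC =====
def Spec_minimal_replacement_cost_py (first : String) (second : String) (out : Int) : Prop := out = minimal_replacement_cost_py_alt first second
instance (first : String) (second : String) (out : Int) : Decidable (Spec_minimal_replacement_cost_py first second out) := by unfold Spec_minimal_replacement_cost_py; infer_instance

-- ===== CLAIM (what is proved, stated in full; the proofs are below) =====
def Claim_equal_minimal_replacement_cost_py : Prop := ∀ (first : String) (second : String), Dom_minimal_replacement_cost_py first second → Spec_minimal_replacement_cost_py first second (minimal_replacement_cost_py first second)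

-- ===== LEMMAS AND PROOFS =====

-- adding a fresh element on the left side of a difference
lemma len_diff_add_left (S1 S2 : PySem.Set Char) (x : Char) (hx : x ∉ S1) :
    PySem.Set.len (PySem.Set.diff (PySem.Set.add S1 x) S2)
      = PySem.Set.len (PySem.Set.diff S1 S2)
        + (if PySem.Set.contains S2 x then 0 else 1) := by
  rw [PySem.Set.add_of_not_mem hx]
  by_cases h : x ∈ S2 <;>
    simp [PySem.Set.diff, PySem.Set.len, List.filter_append, h, PySem.Set.contains]

-- adding a fresh element on the right side of a difference
lemma len_diff_add_right (S1 S2 : PySem.Set Char) (x : Char) (h2 : S2.Nodup) (hx : x ∉ S1) :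
    PySem.Set.len (PySem.Set.diff S2 (PySem.Set.add S1 x))
      = PySem.Set.len (PySem.Set.diff S2 S1)
        - (if PySem.Set.contains S2 x then 1 else 0) := by
  rw [PySem.Set.add_of_not_mem hx]
  have hfilter : PySem.Set.diff S2 (S1 ++ [x])
      = (PySem.Set.diff S2 S1).filter (fun y => y ≠ x) := by
    simp [PySem.Set.diff, PySem.Set.contains, List.filter_filter]
    apply List.filter_congr
    intro y _
    by_cases hy : y = x <;> by_cases hy1 : y ∈ S1 <;> simp [hy, hy1]
  have hF : ((PySem.Set.diff S2 S1) : List Char).Nodup := PySem.Set.nodup_diff S2 S1 h2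
  have herase : (PySem.Set.diff S2 S1).filter (fun y => y ≠ x)
      = (PySem.Set.diff S2 S1).erase x := by
    rw [hF.erase_eq_filter]
    apply List.filter_congr
    intro y _
    by_cases hy : y = x <;> simp [hy]
  rw [hfilter, herase]
  by_cases h : x ∈ S2
  · have hmem : x ∈ PySem.Set.diff S2 S1 := (PySem.Set.mem_diff S2 S1 x).2 ⟨h, hx⟩
    have hlen := List.length_erase_of_mem hmem
    have hpos : 1 ≤ (PySem.Set.diff S2 S1).length := List.length_pos_of_mem hmem
    simp [PySem.Set.len, hlen, PySem.Set.contains, h]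
    omega
  · have hmem : x ∉ PySem.Set.diff S2 S1 := fun hc => h ((PySem.Set.mem_diff S2 S1 x).1 hc).1
    rw [List.erase_of_not_mem hmem]
    simp [PySem.Set.contains, h]

-- B's per-character update computes exactly the new difference counts
lemma altStepF_spec (a : Char) (S1 S2 : PySem.Set Char) (h2 : S2.Nodup) :
    altStepF a S1 S2 (PySem.Set.len (PySem.Set.diff S1 S2)) (PySem.Set.len (PySem.Set.diff S2 S1))
      = (PySem.Set.add S1 a, S2,
         PySem.Set.len (PySem.Set.diff (PySem.Set.add S1 a) S2),
         PySem.Set.len (PySem.Set.diff S2 (PySem.Set.add S1 a))) := by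
  by_cases h1a : a ∈ S1
  · rw [PySem.Set.add_of_mem h1a]
    simp [altStepF, PySem.Set.contains, h1a]
  · rw [len_diff_add_left S1 S2 a h1a, len_diff_add_right S1 S2 a h2 h1a]
    by_cases h2a : a ∈ S2 <;> simp [altStepF, PySem.Set.contains, h1a, h2a]

lemma altStepS_spec (b : Char) (S1 S2 : PySem.Set Char) (h1 : S1.Nodup) :
    altStepS b S1 S2 (PySem.Set.len (PySem.Set.diff S1 S2)) (PySem.Set.len (PySem.Set.diff S2 S1))
      = (S1, PySem.Set.add S2 b,
         PySem.Set.len (PySem.Set.diff S1 (PySem.Set.add S2 b)),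
         PySem.Set.len (PySem.Set.diff (PySem.Set.add S2 b) S1)) := by
  by_cases h2b : b ∈ S2
  · rw [PySem.Set.add_of_mem h2b]
    simp [altStepS, PySem.Set.contains, h2b]
  · rw [len_diff_add_left S2 S1 b h2b, len_diff_add_right S2 S1 b h1 h2b]
    by_cases h1b : b ∈ S1 <;> simp [altStepS, PySem.Set.contains, h2b, h1b]

-- loop correspondence
lemma altGo_eq_fold (xs ys : List Char) (S1 S2 : PySem.Set Char)
    (h1 : S1.Nodup) (h2 : S2.Nodup) (rem ins : Int) :
    altGo xs ys S1 S2 (PySem.Set.len (PySem.Set.diff S1 S2))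
      (PySem.Set.len (PySem.Set.diff S2 S1)) rem ins
      = (let r := (zipLongest xs ys).foldl aStep (S1, S2, rem, ins)
         min r.2.2.1 r.2.2.2) := by
  induction xs generalizing ys S1 S2 rem ins with
  | nil =>
    induction ys generalizing S1 S2 rem ins with
    | nil => simp [altGo, zipLongest]
    | cons b ys' ihy =>
      have hstep := altStepS_spec b S1 S2 h1
      simp only [altGo, zipLongest, List.foldl, hstep, aStep]
      exact ihy S1 (PySem.Set.add S2 b) h1 (PySem.Set.nodup_add S2 b h2) _ _
  | cons a xs' ihx =>
    cases ys with
    | nil =>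
      have hstep := altStepF_spec a S1 S2 h2
      simp only [altGo, zipLongest, List.foldl, hstep, aStep]
      exact ihx [] (PySem.Set.add S1 a) S2 (PySem.Set.nodup_add S1 a h1) h2 _ _
    | cons b ys' =>
      have hstepF := altStepF_spec a S1 S2 h2
      have hstepS := altStepS_spec b (PySem.Set.add S1 a) S2 (PySem.Set.nodup_add S1 a h1)
      simp only [altGo, zipLongest, List.foldl, hstepF, hstepS, aStep]
      exact ihx ys' (PySem.Set.add S1 a) (PySem.Set.add S2 b)
        (PySem.Set.nodup_add S1 a h1) (PySem.Set.nodup_add S2 b h2) _ _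

-- ===== VERDICT (by name: the statement is the Claim_ definition above) =====
theorem minimal_replacement_cost_py_spec : Claim_equal_minimal_replacement_cost_py := by
  intro first second _
  unfold Spec_minimal_replacement_cost_py minimal_replacement_cost_py minimal_replacement_cost_py_alt
  have h := altGo_eq_fold first.toList second.toList PySem.Set.empty PySem.Set.empty
    List.nodup_nil List.nodup_nil 0 0
  simpa using h.symm
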